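-- pv_equiv track=rewrite | github.com/aanzolaavila/competitive-problems | Maratones/Basica 2015-2/corregidos/tariff.py | tarifa
-- ===== SOURCE A (Python) =====
-- def tarifa(calls) -> str:
--     mile, juice = 0, 0
--     for call in calls:
--         n = 0
--         while not(30*n<=call<= 30*(n+1)-1): n += 1
--         mile += 10*(n+1)
--         n = 0
--         while not(60*n<=call<= 60*(n+1)-1): n += 1
--         juice += 15*(n+1)
--
--     if mile == juice:
--         return "Mile Juice " + str(mile)
--     elif mile < juice:
--         return "Mile " + str(mile)
--     else: return "Juice " + str(juice)
-- ===== SOURCE B (Python) =====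
-- def tarifa(calls) -> str:
--     mile = sum(10 * (call // 30 + 1) for call in calls)
--     juice = sum(15 * (call // 60 + 1) for call in calls)
--     if mile == juice:
--         return "Mile Juice " + str(mile)
--     elif mile < juice:
--         return "Mile " + str(mile)
--     else:
--         return "Juice " + str(juice)
-- ===== Notes on version B (the rewrite author's own statement) =====
-- stated objective: faster
-- what changed: The per-call linear search for the tariff tier (incrementing n until the call duration falls in its 30s/60s bracket) is replaced by direct integer division call//30 and call//60, and the accumulation becomes two sums.
import Mathlib
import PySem

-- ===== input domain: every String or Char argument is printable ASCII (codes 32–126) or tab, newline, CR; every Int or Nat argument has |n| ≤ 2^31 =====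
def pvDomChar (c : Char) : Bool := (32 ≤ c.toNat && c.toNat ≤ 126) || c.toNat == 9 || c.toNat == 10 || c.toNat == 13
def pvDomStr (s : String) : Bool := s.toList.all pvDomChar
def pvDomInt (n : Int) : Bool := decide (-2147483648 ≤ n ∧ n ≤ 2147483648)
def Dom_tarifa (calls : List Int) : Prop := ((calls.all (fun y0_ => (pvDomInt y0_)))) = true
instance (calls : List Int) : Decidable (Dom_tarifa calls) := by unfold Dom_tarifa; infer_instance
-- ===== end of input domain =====

-- ===== PORT A =====
-- B replaces A's per-call linear tier search by integer division (asymptotically faster);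
-- equivalence is claimed on nonnegative call values (A's while-loop diverges on negative ones).

-- the inner 'while not(30*n<=call<=30*(n+1)-1): n += 1' (step = 30 or 60);
-- the second 'if' is a divergence guard: Python loops forever there (excluded by Pre_)
def tarifaFind30 (call n : Int) : Int :=
  if 30*n ≤ call ∧ call ≤ 30*(n+1)-1 then n
  else if call < 30*(n+1) then n
  else tarifaFind30 call (n+1)
termination_by (call - 30*n).toNat
decreasing_by omega

def tarifaFind60 (call n : Int) : Int :=
  if 60*n ≤ call ∧ call ≤ 60*(n+1)-1 then n
  else if call < 60*(n+1) then n
  else tarifaFind60 call (n+1)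
termination_by (call - 60*n).toNat
decreasing_by omega

def tarifaLoop (calls : List Int) (mile juice : Int) : Int × Int :=
  match calls with
  | [] => (mile, juice)
  | call :: rest =>
      tarifaLoop rest (mile + 10*(tarifaFind30 call 0 + 1)) (juice + 15*(tarifaFind60 call 0 + 1))

def tarifa (calls : List Int) : String :=
  let mj := tarifaLoop calls 0 0
  let mile := mj.1
  let juice := mj.2
  if mile = juice then "Mile Juice " ++ PySem.Int.toStr mile
  else if mile < juice then "Mile " ++ PySem.Int.toStr mile
  else "Juice " ++ PySem.Int.toStr juice

-- ===== PORT B =====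
def tarifa_alt (calls : List Int) : String :=
  let mile := (calls.map (fun call => 10 * (PySem.Int.floordiv call 30 + 1))).sum
  let juice := (calls.map (fun call => 15 * (PySem.Int.floordiv call 60 + 1))).sum
  if mile = juice then "Mile Juice " ++ PySem.Int.toStr mile
  else if mile < juice then "Mile " ++ PySem.Int.toStr mile
  else "Juice " ++ PySem.Int.toStr juice

-- ===== PRECONDITION & SPEC =====
-- Pre_ excludes lists containing a negative call value: there A's inner while-loop never
-- terminates (no exception, no return), so no value of A exists to compare with.
def Pre_tarifa (calls : List Int) : Prop := ∀ c ∈ calls, 0 ≤ c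
instance (calls : List Int) : Decidable (Pre_tarifa calls) := by unfold Pre_tarifa; infer_instance
def pvWitness_tarifa : List Int := [29, 30, 61, 0]
def Spec_tarifa (calls : List Int) (out : String) : Prop := out = tarifa_alt calls
instance (calls : List Int) (out : String) : Decidable (Spec_tarifa calls out) := by unfold Spec_tarifa; infer_instance

-- ===== CLAIM (what is proved, stated in full; the proofs are below) =====
def Claim_equal_tarifa : Prop := ∀ (calls : List Int), Dom_tarifa calls → Pre_tarifa calls → Spec_tarifa calls (tarifa calls)

-- ===== LEMMAS AND PROOFS =====

theorem tarifaFind30_eq (call n : Int) (_hc : 0 ≤ call) (hn : 30*n ≤ call) :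
    tarifaFind30 call n = PySem.Int.floordiv call 30 := by
  fun_induction tarifaFind30 call n with
  | case1 n h => exact ((PySem.Int.floordiv_eq_iff_of_pos (by omega)).mpr (by omega)).symm
  | case2 n h1 h2 => omega
  | case3 n h1 h2 ih => exact ih (by omega)

theorem tarifaFind60_eq (call n : Int) (_hc : 0 ≤ call) (hn : 60*n ≤ call) :
    tarifaFind60 call n = PySem.Int.floordiv call 60 := by
  fun_induction tarifaFind60 call n with
  | case1 n h => exact ((PySem.Int.floordiv_eq_iff_of_pos (by omega)).mpr (by omega)).symm
  | case2 n h1 h2 => omega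
  | case3 n h1 h2 ih => exact ih (by omega)

theorem tarifaLoop_eq (calls : List Int) (mile juice : Int)
    (h : ∀ c ∈ calls, 0 ≤ c) :
    tarifaLoop calls mile juice =
      (mile + (calls.map (fun call => 10 * (PySem.Int.floordiv call 30 + 1))).sum,
       juice + (calls.map (fun call => 15 * (PySem.Int.floordiv call 60 + 1))).sum) := by
  induction calls generalizing mile juice with
  | nil => simp [tarifaLoop]
  | cons c rest ih =>
      have hc : (0:Int) ≤ c := h c (List.mem_cons_self ..)
      rw [tarifaLoop, ih _ _ (fun x hx => h x (List.mem_cons_of_mem _ hx)),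
        tarifaFind30_eq c 0 hc (by omega), tarifaFind60_eq c 0 hc (by omega)]
      simp; constructor <;> ring

-- ===== VERDICT (by name: the statement is the Claim_ definition above) =====
theorem tarifa_spec : Claim_equal_tarifa := by
  intro calls _ hpre
  unfold Spec_tarifa tarifa tarifa_alt
  rw [tarifaLoop_eq calls 0 0 hpre]
  simp
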